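-- pv_equiv track=rewrite | github.com/cnYvesLi/International-Number-Chess | test.py | get_line_coordinates
-- ===== SOURCE A (Python) =====
-- def get_line_coordinates(col, row, point_map):
--     """
--     获取指定点所在的横行、左斜行、右斜行的所有有效点坐标
--
--     斜行判定规则：
--     - 右斜行：(a, b), (a-1, b-1), (a+1, b+1) 在同一行 (col - row = 常数)
--     - 左斜行：(a, b), (a+1, b-1), (a-1, b+1) 在同一行 (col + row = 常数)
--
--     参数:
--         col: 列坐标 (0-14)
--         row: 行坐标
--         point_map: 包含所有有效点坐标的字典或可迭代对象
--
--     返回: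
--         tuple: (left_diagonal, right_diagonal, horizontal_line)
--         - left_diagonal: 左斜行坐标列表 [(col, row), ...]
--         - right_diagonal: 右斜行坐标列表 [(col, row), ...]
--         - horizontal_line: 横行坐标列表 [(col, row), ...]
--     """
--
--     # 获取横行坐标（相同列的所有点）
--     horizontal_line = []
--     for pos in point_map:
--         if pos[0] == col:  # 相同列
--             horizontal_line.append(pos)
--
--     # 获取右斜行坐标（col - row = 常数）
--     # 右斜行：(a, b), (a-1, b-1), (a+1, b+1) 都满足 col - row = 常数
--     right_diagonal = []
--     target_right_diff = col - row
--     for pos in point_map: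
--         if pos[0] - pos[1] == target_right_diff:
--             right_diagonal.append(pos)
--
--     # 获取左斜行坐标（col + row = 常数）
--     # 左斜行：(a, b), (a+1, b-1), (a-1, b+1) 都满足 col + row = 常数
--     left_diagonal = []
--     target_left_sum = col + row
--     for pos in point_map:
--         if pos[0] + pos[1] == target_left_sum:
--             left_diagonal.append(pos)
--
--     # 按坐标排序
--     horizontal_line.sort(key=lambda x: x[1])  # 按行排序
--     right_diagonal.sort(key=lambda x: (x[0], x[1]))  # 按列再按行排序
--     left_diagonal.sort(key=lambda x: (x[0], x[1]))   # 按列再按行排序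
--
--     return left_diagonal, right_diagonal, horizontal_line
-- ===== SOURCE B (Python) =====
-- def get_line_coordinates(col, row, point_map):
--     # One pass builds three hash indices grouping every point by its column,
--     # its diagonal (x-y) and its anti-diagonal (x+y); the three lines are then
--     # just three dictionary lookups, each sorted as in the original.
--     by_col = {}
--     by_diff = {}
--     by_sum = {}
--     for p in point_map:
--         by_col.setdefault(p[0], []).append(p)
--         by_diff.setdefault(p[0] - p[1], []).append(p)
--         by_sum.setdefault(p[0] + p[1], []).append(p)
--     horizontal_line = sorted(by_col.get(col, []), key=lambda x: x[1])
--     right_diagonal = sorted(by_diff.get(col - row, []), key=lambda x: (x[0], x[1]))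
--     left_diagonal = sorted(by_sum.get(col + row, []), key=lambda x: (x[0], x[1]))
--     return left_diagonal, right_diagonal, horizontal_line
-- ===== Notes on version B (the rewrite author's own statement) =====
-- stated objective: alternative
-- what changed: Instead of A's three separate filter scans over point_map, B makes a single pass that groups every point into three hash indices keyed by column, x-y and x+y, then obtains each line by one dictionary lookup and applies the same sorts.
import Mathlib
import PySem

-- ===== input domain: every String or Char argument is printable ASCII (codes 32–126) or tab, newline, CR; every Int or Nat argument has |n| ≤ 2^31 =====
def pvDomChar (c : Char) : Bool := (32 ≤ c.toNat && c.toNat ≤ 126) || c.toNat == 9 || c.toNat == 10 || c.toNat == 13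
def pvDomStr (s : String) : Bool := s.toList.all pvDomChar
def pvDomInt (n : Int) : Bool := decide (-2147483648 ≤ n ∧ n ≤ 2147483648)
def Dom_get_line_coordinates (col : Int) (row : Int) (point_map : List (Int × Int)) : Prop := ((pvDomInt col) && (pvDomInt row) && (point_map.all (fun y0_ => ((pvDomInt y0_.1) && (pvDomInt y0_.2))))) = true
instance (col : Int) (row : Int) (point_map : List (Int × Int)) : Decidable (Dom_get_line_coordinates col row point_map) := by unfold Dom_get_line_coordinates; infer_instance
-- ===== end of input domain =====

-- B replaces A's three filter scans by one pass that groups every point into three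
-- dictionaries keyed by column, x-y and x+y, then sorts the three looked-up groups.
-- ===== PORT A =====
def get_line_coordinates (col : Int) (row : Int) (point_map : List (Int × Int)) : (List (Int × Int)) × (List (Int × Int)) × (List (Int × Int)) :=
  let horizontal_line := point_map.foldl (fun acc pos => if pos.1 == col then acc ++ [pos] else acc) []
  let target_right_diff := col - row
  let right_diagonal := point_map.foldl (fun acc pos => if pos.1 - pos.2 == target_right_diff then acc ++ [pos] else acc) []
  let target_left_sum := col + row
  let left_diagonal := point_map.foldl (fun acc pos => if pos.1 + pos.2 == target_left_sum then acc ++ [pos] else acc) []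
  let horizontal_line := PySem.List.sorted horizontal_line (fun x => x.2) false
  let right_diagonal := PySem.List.sorted2 right_diagonal (fun x => x.1) (fun x => x.2) false
  let left_diagonal := PySem.List.sorted2 left_diagonal (fun x => x.1) (fun x => x.2) false
  (left_diagonal, right_diagonal, horizontal_line)

-- ===== PORT B =====
def get_line_coordinates_alt (col : Int) (row : Int) (point_map : List (Int × Int)) : (List (Int × Int)) × (List (Int × Int)) × (List (Int × Int)) :=
  let dicts : PySem.Dict Int (List (Int × Int)) × PySem.Dict Int (List (Int × Int)) × PySem.Dict Int (List (Int × Int)) :=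
    point_map.foldl (fun d p =>
      (d.1.modify p.1 [] (· ++ [p]),
       d.2.1.modify (p.1 - p.2) [] (· ++ [p]),
       d.2.2.modify (p.1 + p.2) [] (· ++ [p])))
      (PySem.Dict.empty, PySem.Dict.empty, PySem.Dict.empty)
  let horizontal_line := PySem.List.sorted (dicts.1.getD col []) (fun x => x.2) false
  let right_diagonal := PySem.List.sorted2 (dicts.2.1.getD (col - row) []) (fun x => x.1) (fun x => x.2) false
  let left_diagonal := PySem.List.sorted2 (dicts.2.2.getD (col + row) []) (fun x => x.1) (fun x => x.2) false
  (left_diagonal, right_diagonal, horizontal_line)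

-- ===== PRECONDITION & SPEC =====
def Spec_get_line_coordinates (col : Int) (row : Int) (point_map : List (Int × Int)) (out : (List (Int × Int)) × (List (Int × Int)) × (List (Int × Int))) : Prop := out = get_line_coordinates_alt col row point_map
instance (col : Int) (row : Int) (point_map : List (Int × Int)) (out : (List (Int × Int)) × (List (Int × Int)) × (List (Int × Int))) : Decidable (Spec_get_line_coordinates col row point_map out) := by unfold Spec_get_line_coordinates; infer_instance

-- ===== CLAIM =====
def Claim_equal_get_line_coordinates : Prop := ∀ (col : Int) (row : Int) (point_map : List (Int × Int)), Dom_get_line_coordinates col row point_map → Spec_get_line_coordinates col row point_map (get_line_coordinates col row point_map)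

-- ===== LEMMAS AND PROOFS =====
-- The triple-dictionary fold is the product of the three single-dictionary folds.
theorem triple_foldl (l : List (Int × Int))
    (d1 d2 d3 : PySem.Dict Int (List (Int × Int))) :
    l.foldl (fun d p =>
      (d.1.modify p.1 [] (· ++ [p]),
       d.2.1.modify (p.1 - p.2) [] (· ++ [p]),
       d.2.2.modify (p.1 + p.2) [] (· ++ [p]))) (d1, d2, d3)
    = (l.foldl (fun d p => d.modify p.1 [] (· ++ [p])) d1,
       l.foldl (fun d p => d.modify (p.1 - p.2) [] (· ++ [p])) d2,
       l.foldl (fun d p => d.modify (p.1 + p.2) [] (· ++ [p])) d3) := by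
  induction l generalizing d1 d2 d3 with
  | nil => rfl
  | cons x xs ih => simp [List.foldl_cons, ih]

-- Looking up key c in a dictionary built by grouping each point under key k(p)
-- yields exactly the points whose key equals c, in list order.
theorem getD_group (k : Int × Int → Int) (l : List (Int × Int))
    (d : PySem.Dict Int (List (Int × Int))) (c : Int) :
    (l.foldl (fun d p => d.modify (k p) [] (· ++ [p])) d).getD c []
      = d.getD c [] ++ l.filter (fun p => k p == c) := by
  have h := PySem.Dict.getD_foldl_modify_append (l := l.map (fun p => (k p, p))) (d := d) (c := c)
  rw [List.foldl_map] at h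
  rw [h, List.filter_map]
  simp [Function.comp_def]

-- ===== VERDICT =====
theorem get_line_coordinates_spec : Claim_equal_get_line_coordinates := by
  intro col row point_map _
  unfold Spec_get_line_coordinates get_line_coordinates get_line_coordinates_alt
  simp only [triple_foldl,
    getD_group (fun p => p.1), getD_group (fun p => p.1 - p.2), getD_group (fun p => p.1 + p.2),
    PySem.Dict.getD_empty, List.nil_append,
    PySem.List.foldl_append_if_eq_filter]
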